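-- pv_equiv track=rewrite | github.com/ryanisho/CodeJam | Problem 3.py | solve
-- ===== SOURCE A (Python) =====
-- def solve(times):
--     times = [(times[i][0], times[i][1], i) for i in range(len(times))]
--
--     times.sort(key=lambda x: x[0])
--
--     result = []
--
--     c_end = 0
--     j_end = 0
--
--     for start, end, idx in times:
--         if start < c_end and start < j_end:
--             return "IMPOSSIBLE"
--         elif start >= c_end:
--             result.append(("C", idx))
--             c_end = end
--         else: # elif start >= j_end:
--             result.append(("J", idx))
--             j_end = end
--
--     result.sort(key=lambda x: x[1]) #Sort according to the IDX
--
--     str_result = ''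
--
--     for person, idx in result:
--         str_result += person
--
--     return str_result
-- ===== SOURCE B (Python) =====
-- def solve(times):
--     order = sorted(enumerate(times), key=lambda p: p[1][0])
--
--     # Pass 1: C greedily takes the maximal chain; its choices never depend on J.
--     c_set = set()
--     rest = []
--     c_end = 0
--     for i, (start, end) in order:
--         if start >= c_end:
--             c_set.add(i)
--             c_end = end
--         else:
--             rest.append((start, end))
--
--     # Pass 2: whatever C skipped must itself form a chain, and belongs to J.
--     j_end = 0
--     for start, end in rest:
--         if start < j_end:
--             return "IMPOSSIBLE"
--         j_end = end
--
--     return ''.join('C' if i in c_set else 'J' for i in range(len(times)))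
-- ===== Notes on version B (the rewrite author's own statement) =====
-- stated objective: alternative
-- what changed: B replaces A's single interleaved greedy (tracking both c_end and j_end and collecting (person,idx) tuples to re-sort) with two staged passes: pass 1 extracts the greedy maximal C-chain (correct because A's C decisions depend only on c_end, never on J), pass 2 checks that the leftovers themselves chain for J; the string is rebuilt by set membership over range(len(times)) instead of sorting tuples by index.
import Mathlib
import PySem

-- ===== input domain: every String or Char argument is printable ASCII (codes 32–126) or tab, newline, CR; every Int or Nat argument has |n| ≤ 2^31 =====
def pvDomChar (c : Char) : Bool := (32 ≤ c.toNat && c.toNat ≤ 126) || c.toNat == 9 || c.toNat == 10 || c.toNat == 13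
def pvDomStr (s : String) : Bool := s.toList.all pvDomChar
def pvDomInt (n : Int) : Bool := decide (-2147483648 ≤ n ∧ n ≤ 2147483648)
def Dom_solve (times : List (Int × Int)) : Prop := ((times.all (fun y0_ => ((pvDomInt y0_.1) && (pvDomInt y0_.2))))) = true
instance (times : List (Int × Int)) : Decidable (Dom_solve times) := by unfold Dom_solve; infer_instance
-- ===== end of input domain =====

-- B replaces A's single interleaved two-track greedy (collect (person,idx) tuples, re-sort by idx)
-- with two staged passes — extract C's greedy chain, then check the leftovers chain for J — and a
-- membership-based rebuild of the string (objective: alternative; return value only, no mutation).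

-- ===== PORT A =====
-- A's for-loop with early return "IMPOSSIBLE"; the post-loop re-sort by idx and string build live in the nil case.
def solveLoopA : List (Int × Int × Int) → Int → Int → List (String × Int) → String
  | [], _, _, result =>
    (PySem.List.sorted result (fun x => x.2) false).foldl (fun acc p => acc ++ p.1) ""
  | (start, stop, idx) :: rest, cEnd, jEnd, result =>
    if start < cEnd ∧ start < jEnd then "IMPOSSIBLE"
    else if cEnd ≤ start then solveLoopA rest stop jEnd (result ++ [("C", idx)])
    else solveLoopA rest cEnd stop (result ++ [("J", idx)])

def solve (times : List (Int × Int)) : String :=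
  -- times = [(times[i][0], times[i][1], i) for i in range(len(times))], then times.sort(key=x[0]);
  -- i is always in range, so pyGetD's default is never used
  solveLoopA
    (PySem.List.sorted
      ((PySem.List.pyRange 0 (times.length : Int) 1).map
        (fun i => ((PySem.List.pyGetD times i (0, 0)).1, (PySem.List.pyGetD times i (0, 0)).2, i)))
      (fun x => x.1) false)
    0 0 []

-- ===== PORT B =====
-- B's pass 1: the greedy C-chain goes into c_set, everything else into rest.
def solveLoop1B : List (Int × (Int × Int)) → Int → PySem.Set Int → List (Int × Int) →
    PySem.Set Int × List (Int × Int)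
  | [], _, cset, rest => (cset, rest)
  | (i, (start, stop)) :: t, cEnd, cset, rest =>
    if cEnd ≤ start then solveLoop1B t stop (PySem.Set.add cset i) rest
    else solveLoop1B t cEnd cset (rest ++ [(start, stop)])

-- B's pass 2: the leftovers must chain for J (early 'return "IMPOSSIBLE"' = result false).
def solveLoop2B : List (Int × Int) → Int → Bool
  | [], _ => true
  | (start, stop) :: t, jEnd => if start < jEnd then false else solveLoop2B t stop

def solve_alt (times : List (Int × Int)) : String :=
  let p := solveLoop1B (PySem.List.sorted (PySem.List.enumerate times) (fun q => q.2.1) false)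
    0 PySem.Set.empty []
  if solveLoop2B p.2 0 then
    String.join ((PySem.List.pyRange 0 (times.length : Int) 1).map
      (fun i => if PySem.Set.contains p.1 i then "C" else "J"))
  else "IMPOSSIBLE"

-- ===== PRECONDITION & SPEC =====
def Spec_solve (times : List (Int × Int)) (out : String) : Prop := out = solve_alt times
instance (times : List (Int × Int)) (out : String) : Decidable (Spec_solve times out) := by unfold Spec_solve; infer_instance

-- ===== CLAIM (what is proved, stated in full; the proofs are below) =====
def Claim_equal_solve : Prop := ∀ (times : List (Int × Int)), Dom_solve times → Spec_solve times (solve times)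

-- ===== LEMMAS AND PROOFS =====

-- first-match lookup of index k in A's (person, idx) accumulator; "" when absent
def lk : List (String × Int) → Int → String
  | [], _ => ""
  | (s, i) :: t, k => if i = k then s else lk t k

theorem lk_mem (acc : List (String × Int)) (s : String) (i : Int)
    (hnd : (acc.map (·.2)).Nodup) (h : (s, i) ∈ acc) : lk acc i = s := by
  induction acc with
  | nil => simp at h
  | cons a t ih =>
    obtain ⟨s', j⟩ := a
    simp only [List.map_cons, List.nodup_cons] at hnd
    rcases List.mem_cons.mp h with h1 | h1
    · cases h1; simp [lk]
    · have hji : j ≠ i := fun hji =>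
        hnd.1 (hji ▸ (List.mem_map_of_mem (f := (·.2)) h1 : (s, i).2 ∈ t.map (·.2)))
      simp [lk, hji, ih hnd.2 h1]

theorem lk_mem_of_key (acc : List (String × Int)) (i : Int)
    (h : i ∈ acc.map (·.2)) : (lk acc i, i) ∈ acc := by
  induction acc with
  | nil => simp at h
  | cons a t ih =>
    obtain ⟨s, j⟩ := a
    by_cases hj : j = i
    · subst hj; simp [lk]
    · simp only [List.map_cons, List.mem_cons] at h
      rcases h with h | h
      · exact absurd h.symm hj
      · simp [lk, hj, ih h]

theorem nodup_pair_range (n : Nat) (acc : List (String × Int)) :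
    ((List.range n).map (fun k : Nat => (lk acc (k : Int), (k : Int)))).Nodup := by
  have h := List.nodup_range (n := n)
  have h2 := List.Nodup.map (f := fun k : Nat => (lk acc (k : Int), (k : Int))) ?_ h
  · exact h2
  · intro a b hab
    simpa using congrArg Prod.snd hab

theorem nodup_cast_range (n : Nat) :
    ((List.range n).map (fun k : Nat => (k : Int))).Nodup := by
  have h := List.nodup_range (n := n)
  have h2 := List.Nodup.map (f := fun k : Nat => (k : Int)) ?_ h
  · exact h2
  · intro a b hab
    simpa using hab

-- sorting a mapped list with a key that factors through the map
theorem insertBy_map {α β : Type} (g : α → β) (bf : β → β → Bool) (bg : α → α → Bool)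
    (hb : ∀ a b, bf (g a) (g b) = bg a b) (x : α) (ys : List α) :
    PySem.List.insertBy bf (g x) (ys.map g) = (PySem.List.insertBy bg x ys).map g := by
  induction ys with
  | nil => simp [PySem.List.insertBy]
  | cons y t ih => simp [PySem.List.insertBy, hb, ih]; split <;> simp

theorem sorted_map {α β κ : Type} [LinearOrder κ] (g : α → β) (kf : β → κ) (kg : α → κ)
    (hk : ∀ a, kf (g a) = kg a) (xs : List α) :
    PySem.List.sorted (xs.map g) kf false = (PySem.List.sorted xs kg false).map g := by
  rw [PySem.List.sorted_eq_foldl_insertBy, PySem.List.sorted_eq_foldl_insertBy]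
  suffices h : ∀ acc : List α,
      (xs.map g).foldl (fun acc x => PySem.List.insertBy (fun a b => decide (kf a < kf b)) x acc) (acc.map g)
      = (xs.foldl (fun acc x => PySem.List.insertBy (fun a b => decide (kg a < kg b)) x acc) acc).map g by
    simpa using h []
  induction xs with
  | nil => intro acc; simp
  | cons x t ih =>
    intro acc
    simp only [List.map_cons, List.foldl_cons]
    rw [insertBy_map g (fun a b => decide (kf a < kf b)) (fun a b => decide (kg a < kg b))
      (fun a b => by show decide (kf (g a) < kf (g b)) = decide (kg a < kg b); rw [hk, hk]) x acc, ih]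

-- proof-side view of B's pass 2: the end time after a successful chain, none on failure
def jRun : List (Int × Int) → Int → Option Int
  | [], j => some j
  | (s, e) :: t, j => if s < j then none else jRun t e

theorem loop2_eq_jRun (xs : List (Int × Int)) (j : Int) :
    solveLoop2B xs j = (jRun xs j).isSome := by
  induction xs generalizing j with
  | nil => rfl
  | cons a t ih => obtain ⟨s, e⟩ := a; simp only [solveLoop2B, jRun]; split <;> simp [ih]

theorem jRun_append (xs ys : List (Int × Int)) (j : Int) :
    jRun (xs ++ ys) j = (jRun xs j).bind (fun j' => jRun ys j') := by
  induction xs generalizing j with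
  | nil => rfl
  | cons a t ih => obtain ⟨s, e⟩ := a; simp only [List.cons_append, jRun]; split <;> simp [ih]

-- B's pass 1 threads cset and rest independently of the rest accumulator
theorem loop1_split (l : List (Int × (Int × Int))) (c : Int) (cset : PySem.Set Int)
    (rest : List (Int × Int)) :
    solveLoop1B l c cset rest
      = ((solveLoop1B l c cset []).1, rest ++ (solveLoop1B l c cset []).2) := by
  induction l generalizing c cset rest with
  | nil => simp [solveLoop1B]
  | cons a t ih =>
    obtain ⟨i, s, e⟩ := a
    simp only [solveLoop1B]
    split
    · exact ih ..
    · rw [ih _ _ (rest ++ [(s, e)]), ih _ _ ([] ++ [(s, e)])]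
      simp

-- main invariant: A's interleaved loop equals B's staged pipeline
theorem loop_eq (n : Nat) (l : List (Int × Int × Int)) (c j : Int)
    (acc : List (String × Int)) (cset : PySem.Set Int) (rest : List (Int × Int))
    (hperm : (acc.map (·.2) ++ l.map (·.2.2)).Perm ((List.range n).map (fun k : Nat => (k : Int))))
    (hnd : (acc.map (·.2) ++ l.map (·.2.2)).Nodup)
    (hC : ∀ s i, (s, i) ∈ acc → (s = "C" ∧ i ∈ cset) ∨ (s = "J" ∧ i ∉ cset))
    (hsub : ∀ i : Int, i ∈ cset → i ∈ acc.map (·.2))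
    (hrest : jRun rest 0 = some j) :
    solveLoopA l c j acc =
      (if solveLoop2B (solveLoop1B (l.map (fun t => (t.2.2, (t.1, t.2.1)))) c cset rest).2 0 then
         String.join ((PySem.List.pyRange 0 (n : Int) 1).map
           (fun i => if PySem.Set.contains (solveLoop1B (l.map (fun t => (t.2.2, (t.1, t.2.1)))) c cset rest).1 i then "C" else "J"))
       else "IMPOSSIBLE") := by
  induction l generalizing c j acc cset rest with
  | nil =>
    simp only [List.map_nil, List.append_nil] at hperm hnd
    simp only [List.map_nil, solveLoop1B]
    rw [loop2_eq_jRun, hrest]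
    simp only [Option.isSome_some, if_true]
    -- A's sorted accumulator listed by increasing idx
    have hndys := nodup_pair_range n acc
    have hys : PySem.List.sorted acc (fun x => x.2) false
        = (List.range n).map (fun k : Nat => (lk acc (k : Int), (k : Int))) := by
      apply PySem.List.sorted_eq_of_perm_of_pairwise_lt
      · refine (List.perm_ext_iff_of_nodup hndys (List.Nodup.of_map _ hnd)).mpr ?_
        rintro ⟨s, i⟩
        constructor
        · intro hm
          obtain ⟨k, hk, he⟩ := List.mem_map.mp hm
          have hkey : (k : Int) ∈ acc.map (·.2) :=
            hperm.mem_iff.mpr (List.mem_map.mpr ⟨k, hk, rfl⟩)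
          exact he ▸ lk_mem_of_key acc (k : Int) hkey
        · intro hm
          have hkey : i ∈ acc.map (·.2) := List.mem_map.mpr ⟨(s, i), hm, rfl⟩
          obtain ⟨k, hk, rfl⟩ := List.mem_map.mp (hperm.mem_iff.mp hkey)
          have hlk : lk acc (k : Int) = s := lk_mem acc s _ hnd hm
          exact List.mem_map.mpr ⟨k, hk, by simp [hlk]⟩
      · refine List.Pairwise.map _ (fun a b h => ?_) (List.pairwise_lt_range (n := n))
        simpa using h
    simp only [solveLoopA, hys]
    -- both sides fold letter-by-letter over range n
    have hpt : ∀ k : Nat, k ∈ List.range n →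
        lk acc (k : Int) = (if PySem.Set.contains cset (k : Int) then "C" else "J") := by
      intro k hk
      have hkey : (k : Int) ∈ acc.map (·.2) :=
        hperm.mem_iff.mpr (List.mem_map.mpr ⟨k, hk, rfl⟩)
      have hmem := lk_mem_of_key acc (k : Int) hkey
      rcases hC _ _ hmem with ⟨hs, hc⟩ | ⟨hs, hc⟩
      · rw [hs, if_pos ((PySem.Set.contains_iff cset ((k : Nat) : Int)).mpr hc)]
      · rw [hs, if_neg (fun hcon => hc ((PySem.Set.contains_iff cset ((k : Nat) : Int)).mp hcon))]
    rw [List.foldl_map, String.join, PySem.List.pyRange_one 0 (n : Int), List.map_map,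
      List.foldl_map]
    have hn0 : (((n : Int)) - 0).toNat = n := by omega
    rw [hn0]
    refine PySem.List.foldl_congr_mem _ _ _ _ ?_
    intro b k hk
    simp [hpt k hk]
  | cons hd tl ih =>
    obtain ⟨s, e, i⟩ := hd
    have hi_notin : i ∉ acc.map (·.2) := by
      have h' := hnd
      rw [List.nodup_append] at h'
      exact fun hm => (h'.2.2 i hm i (by simp)) rfl
    have hkeys : ∀ v : String, (acc ++ [(v, i)]).map (·.2) ++ tl.map (·.2.2)
        = acc.map (·.2) ++ ((s, e, i) :: tl).map (·.2.2) := by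
      intro v; simp
    simp only [solveLoopA, List.map_cons]
    by_cases himp : s < c ∧ s < j
    · -- IMPOSSIBLE: (s,e) joins rest and breaks the J chain, so pass 2 fails
      have hB : solveLoop1B ((i, (s, e)) :: tl.map (fun t => (t.2.2, (t.1, t.2.1)))) c cset rest
          = solveLoop1B (tl.map (fun t => (t.2.2, (t.1, t.2.1)))) c cset (rest ++ [(s, e)]) := by
        simp only [solveLoop1B, if_neg (show ¬ c ≤ s by omega)]
      rw [if_pos himp]
      simp only [hB]
      have hcond : solveLoop2B
          (solveLoop1B (tl.map (fun t => (t.2.2, (t.1, t.2.1)))) c cset (rest ++ [(s, e)])).2 0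
          = false := by
        rw [loop2_eq_jRun,
          loop1_split (tl.map (fun t => (t.2.2, (t.1, t.2.1)))) c cset (rest ++ [(s, e)])]
        simp only [jRun_append, hrest, Option.bind]
        simp [jRun, himp.2]
      simp [hcond]
    · rw [if_neg himp]
      by_cases hcs : c ≤ s
      · -- C branch
        have hB : solveLoop1B ((i, (s, e)) :: tl.map (fun t => (t.2.2, (t.1, t.2.1)))) c cset rest
            = solveLoop1B (tl.map (fun t => (t.2.2, (t.1, t.2.1)))) e (PySem.Set.add cset i) rest := by
          simp only [solveLoop1B, if_pos hcs]
        rw [if_pos hcs]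
        simp only [hB]
        refine ih e j (acc ++ [("C", i)]) (PySem.Set.add cset i) rest
          (hkeys "C" ▸ hperm) (hkeys "C" ▸ hnd) ?_ ?_ hrest
        · intro v k hm
          rcases List.mem_append.mp hm with hm | hm
          · rcases hC v k hm with ⟨hs, hc⟩ | ⟨hs, hc⟩
            · exact Or.inl ⟨hs, (PySem.Set.mem_add cset i k).mpr (Or.inl hc)⟩
            · refine Or.inr ⟨hs, fun hk => ?_⟩
              rcases (PySem.Set.mem_add cset i k).mp hk with hk | hk
              · exact hc hk
              · exact hi_notin (hk ▸ List.mem_map.mpr ⟨(v, k), hm, rfl⟩)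
          · simp only [List.mem_singleton] at hm
            cases hm
            exact Or.inl ⟨rfl, (PySem.Set.mem_add cset i i).mpr (Or.inr rfl)⟩
        · intro k hk
          rcases (PySem.Set.mem_add cset i k).mp hk with hk | hk
          · simp only [List.map_append, List.mem_append]
            exact Or.inl (hsub k hk)
          · simp [hk]
      · -- J branch
        have hB : solveLoop1B ((i, (s, e)) :: tl.map (fun t => (t.2.2, (t.1, t.2.1)))) c cset rest
            = solveLoop1B (tl.map (fun t => (t.2.2, (t.1, t.2.1)))) c cset (rest ++ [(s, e)]) := by
          simp only [solveLoop1B, if_neg hcs]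
        rw [if_neg hcs]
        simp only [hB]
        have hjs : ¬ s < j := fun hlt => himp ⟨by omega, hlt⟩
        refine ih c e (acc ++ [("J", i)]) cset (rest ++ [(s, e)])
          (hkeys "J" ▸ hperm) (hkeys "J" ▸ hnd) ?_ ?_ ?_
        · intro v k hm
          rcases List.mem_append.mp hm with hm | hm
          · exact hC v k hm
          · simp only [List.mem_singleton] at hm
            cases hm
            exact Or.inr ⟨rfl, fun hk => hi_notin (hsub i hk)⟩
        · intro k hk
          simp only [List.map_append, List.mem_append]
          exact Or.inl (hsub k hk)
        · rw [jRun_append, hrest]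
          simp [jRun, hjs]

-- ===== VERDICT (by name: the statement is the Claim_ definition above) =====
theorem solve_spec : Claim_equal_solve := by
  intro times _
  unfold Spec_solve solve solve_alt
  set n := times.length with hn
  have htriples :
      (PySem.List.pyRange 0 (n : Int) 1).map
        (fun i => ((PySem.List.pyGetD times i (0, 0)).1, (PySem.List.pyGetD times i (0, 0)).2, i))
      = (PySem.List.enumerate times).map (fun p => (p.2.1, p.2.2, p.1)) := by
    rw [PySem.List.enumerate_eq_map_pyRange (d := (0, 0)), List.map_map]
    rfl
  rw [htriples, sorted_map (fun p => (p.2.1, p.2.2, p.1)) (fun x => x.1) (fun p => p.2.1)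
      (fun a => rfl) (PySem.List.enumerate times)]
  set sb := PySem.List.sorted (PySem.List.enumerate times) (fun p => p.2.1) false with hsb
  have hback : (sb.map (fun p => (p.2.1, p.2.2, p.1))).map (fun t => (t.2.2, (t.1, t.2.1))) = sb := by
    rw [List.map_map]
    exact List.map_id'' (fun p => rfl) sb
  have h1 : (sb.map (fun p => (p.2.1, p.2.2, p.1))).map (·.2.2) = sb.map (·.1) := by
    rw [List.map_map]; rfl
  have h2 : (sb.map (·.1)).Perm ((List.range n).map (fun k : Nat => (k : Int))) := by
    have hp : (sb.map (·.1)).Perm ((PySem.List.enumerate times).map (·.1)) :=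
      (PySem.List.sorted_perm ..).map _
    rw [PySem.List.map_fst_enumerate] at hp
    refine hp.trans ?_
    rw [show (0 : Int) + times.length = (n : Int) by omega, PySem.List.pyRange_one 0 (n : Int)]
    simp
  have hmain := loop_eq n (sb.map (fun p => (p.2.1, p.2.2, p.1))) 0 0 [] PySem.Set.empty []
    (by simpa only [List.map_nil, List.nil_append, h1] using h2)
    (by simp only [List.map_nil, List.nil_append, h1]
        exact h2.nodup_iff.mpr (nodup_cast_range n))
    (by intro s i h; simp at h)
    (by intro i h; simp [PySem.Set.empty] at h)
    rfl
  rw [hmain, hback]
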